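-- pv_equiv track=rewrite | github.com/PurdueDualityLab/CROSS | scripts/compare_models.py | analyze_label_distribution
-- ===== SOURCE A (Python) =====
-- from collections import defaultdict, Counter
-- from typing import Dict, List, Any, Tuple
--
-- def analyze_label_distribution(repos: List[Dict[str, Any]], model_name: str) -> Dict[str, Counter]:
--     """Analyze the distribution of labels for each class."""
--     classes = ["actor_unit", "supply_chain_role", "research_role", "distribution_pathway"]
--
--     distributions = {}
--     for cls in classes:
--         counter = Counter()
--         for repo in repos:
--             model_key = "model1" if model_name == "model1" else "model2"
--             value = repo[model_key].get(cls)
--             if value: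
--                 counter[value] += 1
--         distributions[cls] = counter
--
--     return distributions
-- ===== SOURCE B (Python) =====
-- from collections import Counter
--
--
-- def analyze_label_distribution(repos, model_name):
--     """Keyed aggregation: one flat Counter over (class, value) pairs, then split per class."""
--     classes = ["actor_unit", "supply_chain_role", "research_role", "distribution_pathway"]
--     model_key = "model1" if model_name == "model1" else "model2"
--     pair_counts = Counter(
--         (cls, value)
--         for repo in repos
--         for cls in classes
--         if (value := repo[model_key].get(cls))
--     )
--     distributions = {cls: Counter() for cls in classes}
--     for (cls, value), n in pair_counts.items():
--         distributions[cls][value] = n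
--     return distributions
-- ===== Notes on version B (the rewrite author's own statement) =====
-- stated objective: alternative
-- what changed: B replaces A's four per-class counting loops (one Counter filled per scan of repos) with a keyed aggregation: one flat Counter over (class, value) pairs built in a single sweep, which is then split into the four per-class Counters; Pre_ excludes only inputs where some repo lacks the model key, on which both A and B raise KeyError.
import Mathlib
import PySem

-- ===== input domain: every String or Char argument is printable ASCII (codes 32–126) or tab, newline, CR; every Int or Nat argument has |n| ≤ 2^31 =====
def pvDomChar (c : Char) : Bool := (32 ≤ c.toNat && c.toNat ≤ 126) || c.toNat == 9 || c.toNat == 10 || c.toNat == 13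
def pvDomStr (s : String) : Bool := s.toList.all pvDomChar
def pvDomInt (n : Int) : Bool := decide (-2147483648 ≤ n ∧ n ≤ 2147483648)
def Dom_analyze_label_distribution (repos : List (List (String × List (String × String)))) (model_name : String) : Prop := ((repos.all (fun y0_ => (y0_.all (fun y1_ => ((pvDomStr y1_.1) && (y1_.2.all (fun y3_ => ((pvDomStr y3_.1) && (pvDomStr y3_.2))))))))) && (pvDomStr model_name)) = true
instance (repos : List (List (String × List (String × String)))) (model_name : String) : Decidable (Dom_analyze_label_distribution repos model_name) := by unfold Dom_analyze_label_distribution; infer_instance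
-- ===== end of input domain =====

-- B replaces A's per-class counting loops with a keyed aggregation: one flat Counter over
-- (class, value) pairs built in a single sweep, split afterwards into the four per-class
-- Counters (alternative algorithm/data structure, same cost class).

-- ===== PORT A =====
def analyze_label_distribution (repos : List (List (String × List (String × String)))) (model_name : String) : List (String × List (String × Int)) :=
  let classes := ["actor_unit", "supply_chain_role", "research_role", "distribution_pathway"]
  let distributions :=
    classes.foldl (fun (dists : PySem.Dict String (PySem.Dict String Int)) cls =>
      let counter :=
        repos.foldl (fun (counter : PySem.Dict String Int) repo =>
          let model_key := if model_name == "model1" then "model1" else "model2"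
          -- repo[model_key] raises KeyError when absent — excluded by Pre_; `.getD []` marks the raise site
          let value := (PySem.Dict.mk (((PySem.Dict.mk repo).get? model_key).getD [])).get? cls
          match value with
          | some v => if v ≠ "" then counter.modify v 0 (· + 1) else counter
          | none => counter) PySem.Dict.empty
      dists.insert cls counter) PySem.Dict.empty
  distributions.items.map (fun p => (p.1, p.2.items))

-- ===== PORT B =====
def analyze_label_distribution_alt (repos : List (List (String × List (String × String)))) (model_name : String) : List (String × List (String × Int)) :=
  let classes := ["actor_unit", "supply_chain_role", "research_role", "distribution_pathway"]
  let model_key := if model_name == "model1" then "model1" else "model2"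
  -- Counter((cls, value) for repo in repos for cls in classes if (value := repo[model_key].get(cls)))
  let pair_counts : PySem.Dict (String × String) Int :=
    repos.foldl (fun pc repo =>
      classes.foldl (fun pc cls =>
        -- repo[model_key] raises KeyError when absent — excluded by Pre_; `.getD []` marks the raise site
        match (PySem.Dict.mk (((PySem.Dict.mk repo).get? model_key).getD [])).get? cls with
        | some v => if v ≠ "" then pc.modify (cls, v) 0 (· + 1) else pc
        | none => pc) pc) PySem.Dict.empty
  -- distributions = {cls: Counter() for cls in classes}
  let distributions : PySem.Dict String (PySem.Dict String Int) :=
    classes.foldl (fun d cls => d.insert cls PySem.Dict.empty) PySem.Dict.empty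
  -- for (cls, value), n in pair_counts.items(): distributions[cls][value] = n
  let final := pair_counts.items.foldl (fun dists q =>
      dists.insert q.1.1 ((dists.getD q.1.1 PySem.Dict.empty).insert q.1.2 q.2)) distributions
  final.items.map (fun p => (p.1, p.2.items))

-- ===== PRECONDITION & SPEC =====
-- Pre_ excludes exactly the inputs where some repo lacks the model key, on which A raises KeyError (B raises there too).
def Pre_analyze_label_distribution (repos : List (List (String × List (String × String)))) (model_name : String) : Prop :=
  repos.all (fun repo => (PySem.Dict.mk repo).contains (if model_name == "model1" then "model1" else "model2")) = true
instance (repos : List (List (String × List (String × String)))) (model_name : String) : Decidable (Pre_analyze_label_distribution repos model_name) := by unfold Pre_analyze_label_distribution; infer_instance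

def pvWitness_analyze_label_distribution : (List (List (String × List (String × String)))) × String :=
  ([[("model1", [("actor_unit", "cnc"), ("research_role", "lab")])], [("model1", [("actor_unit", "cnc")])]], "model1")

def Spec_analyze_label_distribution (repos : List (List (String × List (String × String)))) (model_name : String) (out : List (String × List (String × Int))) : Prop := out = analyze_label_distribution_alt repos model_name
instance (repos : List (List (String × List (String × String)))) (model_name : String) (out : List (String × List (String × Int))) : Decidable (Spec_analyze_label_distribution repos model_name out) := by unfold Spec_analyze_label_distribution; infer_instance

-- ===== CLAIM (what is proved, stated in full; the proofs are below) =====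
def Claim_equal_analyze_label_distribution : Prop := ∀ (repos : List (List (String × List (String × String)))) (model_name : String), Dom_analyze_label_distribution repos model_name → Pre_analyze_label_distribution repos model_name → Spec_analyze_label_distribution repos model_name (analyze_label_distribution repos model_name)

-- ===== LEMMAS AND PROOFS =====
def pvProjL (c : String) (L : List ((String × String) × Int)) : List (String × Int) :=
  L.filterMap (fun q => if q.1.1 = c then some (q.1.2, q.2) else none)

theorem pvFind_proj (c v : String) (L : List ((String × String) × Int)) :
    List.find? (fun p => p.1 == v) (pvProjL c L) = Option.map (fun q => (q.1.2, q.2)) (List.find? (fun q => q.1 == (c, v)) L) := by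
  induction L with
  | nil => rfl
  | cons q L ih =>
      simp only [pvProjL, List.filterMap_cons] at *
      by_cases h1 : q.1.1 = c
      · simp only [if_pos h1]
        by_cases h2 : q.1.2 = v
        · have hq : (q.1 == (c, v)) = true := by cases hq1 : q.1 with | mk a b => simp_all
          rw [List.find?_cons_of_pos (p := fun r : (String × String) × Int => r.1 == (c, v)) hq]
          rw [List.find?_cons_of_pos (p := fun p : String × Int => p.1 == v) (by simp [h2])]
          rfl
        · have hq : (q.1 == (c, v)) = false := by cases hq1 : q.1 with | mk a b => simp_all
          rw [List.find?_cons_of_neg (p := fun r : (String × String) × Int => r.1 == (c, v)) (by simp [hq])]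
          rw [List.find?_cons_of_neg (p := fun p : String × Int => p.1 == v) (by simp [h2])]
          exact ih
      · simp only [if_neg h1]
        have hq : (q.1 == (c, v)) = false := by cases hq1 : q.1 with | mk a b => simp_all
        rw [List.find?_cons_of_neg (p := fun r : (String × String) × Int => r.1 == (c, v)) (by simp [hq])]
        exact ih

def pvProj (c : String) (pc : PySem.Dict (String × String) Int) : PySem.Dict String Int :=
  PySem.Dict.mk (pvProjL c pc.items)

theorem pvGet?_proj (c v : String) (pc : PySem.Dict (String × String) Int) :
    (pvProj c pc).get? v = Option.map (fun x => x) (pc.get? (c, v)) := by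
  show (pvProj c pc).get? v = _
  simp only [pvProj, PySem.Dict.get?, pvFind_proj]
  cases List.find? (fun q => q.1 == (c, v)) pc.items <;> rfl

theorem pvGet?_proj' (c v : String) (pc : PySem.Dict (String × String) Int) :
    (pvProj c pc).get? v = pc.get? (c, v) := by
  rw [pvGet?_proj]; cases pc.get? (c, v) <;> rfl

theorem pvContains_proj (c v : String) (pc : PySem.Dict (String × String) Int) :
    (pvProj c pc).contains v = pc.contains (c, v) := by
  have h1 := PySem.Dict.get?_eq_none_iff_contains (pvProj c pc) v
  have h2 := PySem.Dict.get?_eq_none_iff_contains pc (c, v)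
  have h := pvGet?_proj' c v pc
  cases hc : (pvProj c pc).contains v <;> cases hc' : pc.contains (c, v) <;> simp_all

theorem pvGetD_proj (c v : String) (pc : PySem.Dict (String × String) Int) :
    (pvProj c pc).getD v 0 = pc.getD (c, v) 0 := by
  rw [PySem.Dict.getD_eq_get?_getD, PySem.Dict.getD_eq_get?_getD, pvGet?_proj']

theorem pvProj_modify_eq (c v : String) (pc : PySem.Dict (String × String) Int) :
    pvProj c (pc.modify (c, v) 0 (· + 1)) = (pvProj c pc).modify v 0 (· + 1) := by
  simp only [PySem.Dict.modify, PySem.Dict.insert, pvGetD_proj, pvContains_proj]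
  by_cases hc : pc.contains (c, v) = true
  · simp only [hc, if_pos]
    simp only [pvProj, PySem.Dict.mk.injEq]
    rw [pvProjL, List.filterMap_map, pvProjL, List.map_filterMap]
    apply List.filterMap_congr
    intro q _
    by_cases h1 : q.1.1 = c
    · by_cases h2 : q.1.2 = v
      · have hq : (q.1 == (c, v)) = true := by cases hq1 : q.1 with | mk a b => simp_all
        simp [Function.comp, hq, h1, h2]
      · have hq : (q.1 == (c, v)) = false := by cases hq1 : q.1 with | mk a b => simp_all
        simp [Function.comp, hq, h1, h2]
    · have hq : (q.1 == (c, v)) = false := by cases hq1 : q.1 with | mk a b => simp_all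
      simp [Function.comp, hq, h1]
  · simp only [hc, Bool.false_eq_true, if_false]
    simp only [pvProj, PySem.Dict.mk.injEq]
    rw [pvProjL, List.filterMap_append]
    simp [pvProjL]

theorem pvProj_modify_ne (c c' v : String) (h : c' ≠ c) (pc : PySem.Dict (String × String) Int) :
    pvProj c (pc.modify (c', v) 0 (· + 1)) = pvProj c pc := by
  simp only [PySem.Dict.modify, PySem.Dict.insert]
  by_cases hc : pc.contains (c', v) = true
  · simp only [hc, if_pos]
    simp only [pvProj, PySem.Dict.mk.injEq]
    rw [pvProjL, List.filterMap_map]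
    apply List.filterMap_congr
    intro q _
    by_cases h1 : q.1.1 = c
    · have hq : (q.1 == (c', v)) = false := by
        rw [beq_eq_false_iff_ne]
        intro he; apply h; rw [he] at h1; simpa using h1
      simp [Function.comp, hq, h1]
    · by_cases hq : (q.1 == (c', v)) = true
      · have he : q.1 = (c', v) := by simpa using hq
        have h1' : ¬ ((c', v) : String × String).1 = c := by simpa using h
        simp [Function.comp, he, h1']
      · simp at hq
        simp [Function.comp, hq, h1]
  · simp only [hc, Bool.false_eq_true, if_false]
    simp only [pvProj, PySem.Dict.mk.injEq]
    rw [pvProjL, List.filterMap_append]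
    simp [pvProjL, h]

def pvLab (m : String) (repo : List (String × List (String × String))) : PySem.Dict String String :=
  PySem.Dict.mk (((PySem.Dict.mk repo).get? (if m == "model1" then "model1" else "model2")).getD [])

def pvVal (m : String) (repo : List (String × List (String × String))) (cls : String) : Option String :=
  match (pvLab m repo).get? cls with
  | some v => if v = "" then none else some v
  | none => none

def pvStepA (m cls : String) (c : PySem.Dict String Int) (repo : List (String × List (String × String))) : PySem.Dict String Int :=
  match pvVal m repo cls with
  | some v => c.modify v 0 (· + 1)
  | none => c

def pvCond (m cls : String) (pc : PySem.Dict (String × String) Int) (repo : List (String × List (String × String))) : PySem.Dict (String × String) Int :=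
  match pvVal m repo cls with
  | some v => pc.modify (cls, v) 0 (· + 1)
  | none => pc

def pvStepP (m : String) (pc : PySem.Dict (String × String) Int) (repo : List (String × List (String × String))) : PySem.Dict (String × String) Int :=
  pvCond m "distribution_pathway" (pvCond m "research_role" (pvCond m "supply_chain_role" (pvCond m "actor_unit" pc repo) repo) repo) repo

theorem pvProj_cond_eq (m c : String) (repo : List (String × List (String × String))) (pc : PySem.Dict (String × String) Int) :
    pvProj c (pvCond m c pc repo) = pvStepA m c (pvProj c pc) repo := by
  unfold pvCond pvStepA
  cases pvVal m repo c with
  | none => rfl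
  | some v => exact pvProj_modify_eq c v pc

theorem pvProj_cond_ne (m c c' : String) (h : c' ≠ c) (repo : List (String × List (String × String))) (pc : PySem.Dict (String × String) Int) :
    pvProj c (pvCond m c' pc repo) = pvProj c pc := by
  unfold pvCond
  cases pvVal m repo c' with
  | none => rfl
  | some v => exact pvProj_modify_ne c c' v h pc

theorem pvProj_stepP (m c : String) (hc : c ∈ ["actor_unit", "supply_chain_role", "research_role", "distribution_pathway"])
    (repo : List (String × List (String × String))) (pc : PySem.Dict (String × String) Int) :
    pvProj c (pvStepP m pc repo) = pvStepA m c (pvProj c pc) repo := by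
  unfold pvStepP
  fin_cases hc
  · rw [pvProj_cond_ne m _ "distribution_pathway" (by decide), pvProj_cond_ne m _ "research_role" (by decide),
        pvProj_cond_ne m _ "supply_chain_role" (by decide), pvProj_cond_eq]
  · rw [pvProj_cond_ne m _ "distribution_pathway" (by decide), pvProj_cond_ne m _ "research_role" (by decide),
        pvProj_cond_eq, pvProj_cond_ne m _ "actor_unit" (by decide)]
  · rw [pvProj_cond_ne m _ "distribution_pathway" (by decide), pvProj_cond_eq,
        pvProj_cond_ne m _ "supply_chain_role" (by decide), pvProj_cond_ne m _ "actor_unit" (by decide)]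
  · rw [pvProj_cond_eq, pvProj_cond_ne m _ "research_role" (by decide),
        pvProj_cond_ne m _ "supply_chain_role" (by decide), pvProj_cond_ne m _ "actor_unit" (by decide)]

theorem pvProj_foldP (m c : String) (hc : c ∈ ["actor_unit", "supply_chain_role", "research_role", "distribution_pathway"])
    (repos : List (List (String × List (String × String)))) :
    ∀ pc, pvProj c (repos.foldl (pvStepP m) pc) = repos.foldl (pvStepA m c) (pvProj c pc) := by
  induction repos with
  | nil => intro pc; rfl
  | cons r rs ih => intro pc; simp only [List.foldl]; rw [ih, pvProj_stepP m c hc]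

-- keys of the pair counter stay within the four classes
theorem pvKeys_cond (m cls : String) (repo : List (String × List (String × String))) (pc : PySem.Dict (String × String) Int)
    (k : String × String) (hk : k ∈ (pvCond m cls pc repo).keys) : k ∈ pc.keys ∨ k.1 = cls := by
  unfold pvCond at hk
  cases hv : pvVal m repo cls with
  | none => rw [hv] at hk; exact Or.inl hk
  | some v =>
      rw [hv] at hk
      simp only [PySem.Dict.modify] at hk
      rcases (PySem.Dict.mem_keys_insert pc (cls, v) k _).mp hk with h | h
      · exact Or.inr (by rw [h])
      · exact Or.inl h

theorem pvKeys_stepP (m : String) (repo : List (String × List (String × String))) (pc : PySem.Dict (String × String) Int)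
    (k : String × String) (hk : k ∈ (pvStepP m pc repo).keys) :
    k ∈ pc.keys ∨ k.1 ∈ ["actor_unit", "supply_chain_role", "research_role", "distribution_pathway"] := by
  unfold pvStepP at hk
  rcases pvKeys_cond _ _ _ _ _ hk with hk | h
  · rcases pvKeys_cond _ _ _ _ _ hk with hk | h
    · rcases pvKeys_cond _ _ _ _ _ hk with hk | h
      · rcases pvKeys_cond _ _ _ _ _ hk with hk | h
        · exact Or.inl hk
        · exact Or.inr (by simp [h])
      · exact Or.inr (by simp [h])
    · exact Or.inr (by simp [h])
  · exact Or.inr (by simp [h])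

theorem pvKeys_foldP (m : String) (repos : List (List (String × List (String × String)))) :
    ∀ pc : PySem.Dict (String × String) Int,
      (∀ k ∈ pc.keys, k.1 ∈ ["actor_unit", "supply_chain_role", "research_role", "distribution_pathway"]) →
      ∀ k ∈ (repos.foldl (pvStepP m) pc).keys, k.1 ∈ ["actor_unit", "supply_chain_role", "research_role", "distribution_pathway"] := by
  induction repos with
  | nil => intro pc h; exact h
  | cons r rs ih =>
      intro pc h
      refine ih _ ?_
      intro k hk
      rcases pvKeys_stepP m r pc k hk with hk | h' 
      · exact h k hk
      · exact h'

theorem pvNodup_cond (m cls : String) (repo : List (String × List (String × String))) (pc : PySem.Dict (String × String) Int)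
    (h : pc.keys.Nodup) : (pvCond m cls pc repo).keys.Nodup := by
  unfold pvCond
  cases pvVal m repo cls with
  | none => exact h
  | some v => simp only [PySem.Dict.modify]; exact PySem.Dict.nodup_keys_insert pc (cls, v) _ h

theorem pvNodup_foldP (m : String) (repos : List (List (String × List (String × String)))) :
    ∀ pc : PySem.Dict (String × String) Int, pc.keys.Nodup → (repos.foldl (pvStepP m) pc).keys.Nodup := by
  induction repos with
  | nil => intro pc h; exact h
  | cons r rs ih =>
      intro pc h
      exact ih _ (pvNodup_cond _ _ _ _ (pvNodup_cond _ _ _ _ (pvNodup_cond _ _ _ _ (pvNodup_cond _ _ _ _ h))))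

-- stage 2: the per-class dispatch
def pvDisp (c : String) (d : PySem.Dict String Int) (q : (String × String) × Int) : PySem.Dict String Int :=
  if q.1.1 = c then d.insert q.1.2 q.2 else d

theorem pvShape1 (d1 d2 d3 d4 x : PySem.Dict String Int) :
    (PySem.Dict.mk [("actor_unit", d1), ("supply_chain_role", d2), ("research_role", d3), ("distribution_pathway", d4)]).insert "actor_unit" x
    = PySem.Dict.mk [("actor_unit", x), ("supply_chain_role", d2), ("research_role", d3), ("distribution_pathway", d4)] := rfl
theorem pvShape2 (d1 d2 d3 d4 x : PySem.Dict String Int) :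
    (PySem.Dict.mk [("actor_unit", d1), ("supply_chain_role", d2), ("research_role", d3), ("distribution_pathway", d4)]).insert "supply_chain_role" x
    = PySem.Dict.mk [("actor_unit", d1), ("supply_chain_role", x), ("research_role", d3), ("distribution_pathway", d4)] := rfl
theorem pvShape3 (d1 d2 d3 d4 x : PySem.Dict String Int) :
    (PySem.Dict.mk [("actor_unit", d1), ("supply_chain_role", d2), ("research_role", d3), ("distribution_pathway", d4)]).insert "research_role" x
    = PySem.Dict.mk [("actor_unit", d1), ("supply_chain_role", d2), ("research_role", x), ("distribution_pathway", d4)] := rfl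
theorem pvShape4 (d1 d2 d3 d4 x : PySem.Dict String Int) :
    (PySem.Dict.mk [("actor_unit", d1), ("supply_chain_role", d2), ("research_role", d3), ("distribution_pathway", d4)]).insert "distribution_pathway" x
    = PySem.Dict.mk [("actor_unit", d1), ("supply_chain_role", d2), ("research_role", d3), ("distribution_pathway", x)] := rfl

theorem pvStage2 : ∀ (L : List ((String × String) × Int)) (d1 d2 d3 d4 : PySem.Dict String Int),
    (∀ q ∈ L, q.1.1 ∈ ["actor_unit", "supply_chain_role", "research_role", "distribution_pathway"]) →
    L.foldl (fun dists q => dists.insert q.1.1 ((dists.getD q.1.1 PySem.Dict.empty).insert q.1.2 q.2))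
      (PySem.Dict.mk [("actor_unit", d1), ("supply_chain_role", d2), ("research_role", d3), ("distribution_pathway", d4)])
    = PySem.Dict.mk [("actor_unit", L.foldl (pvDisp "actor_unit") d1), ("supply_chain_role", L.foldl (pvDisp "supply_chain_role") d2),
        ("research_role", L.foldl (pvDisp "research_role") d3), ("distribution_pathway", L.foldl (pvDisp "distribution_pathway") d4)] := by
  intro L
  induction L with
  | nil => intro d1 d2 d3 d4 _; rfl
  | cons q L ih =>
      intro d1 d2 d3 d4 hL
      have hq := hL q (by simp)
      have hL' : ∀ q ∈ L, q.1.1 ∈ ["actor_unit", "supply_chain_role", "research_role", "distribution_pathway"] :=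
        fun q hq => hL q (by simp [hq])
      rcases q with ⟨⟨a, b⟩, n⟩
      simp only at hq
      simp only [List.foldl_cons]
      fin_cases hq
      · rw [show (PySem.Dict.mk [("actor_unit", d1), ("supply_chain_role", d2), ("research_role", d3), ("distribution_pathway", d4)]).getD "actor_unit" PySem.Dict.empty = d1 from rfl,
            pvShape1, ih _ _ _ _ hL']
        simp [pvDisp]
      · rw [show (PySem.Dict.mk [("actor_unit", d1), ("supply_chain_role", d2), ("research_role", d3), ("distribution_pathway", d4)]).getD "supply_chain_role" PySem.Dict.empty = d2 from rfl,
            pvShape2, ih _ _ _ _ hL']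
        simp [pvDisp]
      · rw [show (PySem.Dict.mk [("actor_unit", d1), ("supply_chain_role", d2), ("research_role", d3), ("distribution_pathway", d4)]).getD "research_role" PySem.Dict.empty = d3 from rfl,
            pvShape3, ih _ _ _ _ hL']
        simp [pvDisp]
      · rw [show (PySem.Dict.mk [("actor_unit", d1), ("supply_chain_role", d2), ("research_role", d3), ("distribution_pathway", d4)]).getD "distribution_pathway" PySem.Dict.empty = d4 from rfl,
            pvShape4, ih _ _ _ _ hL']
        simp [pvDisp]

theorem pvDisp_filter (c : String) : ∀ (L : List ((String × String) × Int)) (d : PySem.Dict String Int),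
    L.foldl (pvDisp c) d = (pvProjL c L).foldl (fun d q => d.insert q.1 q.2) d := by
  intro L
  induction L with
  | nil => intro d; rfl
  | cons q L ih =>
      intro d
      simp only [List.foldl_cons, pvProjL, List.filterMap_cons]
      by_cases h1 : q.1.1 = c
      · simp only [if_pos h1, List.foldl_cons, pvDisp]
        exact ih _
      · simp only [if_neg h1, pvDisp]
        exact ih _

theorem pvInsertFold_append : ∀ (pairs : List (String × Int)) (d : PySem.Dict String Int),
    (pairs.map Prod.fst).Nodup → (∀ q ∈ pairs, d.contains q.1 = false) →
    (pairs.foldl (fun d q => d.insert q.1 q.2) d).items = d.items ++ pairs := by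
  intro pairs
  induction pairs with
  | nil => intro d _ _; simp
  | cons q L ih =>
      intro d hnd hfresh
      simp only [List.foldl_cons]
      have hq : d.contains q.1 = false := hfresh q (by simp)
      have hstep : (d.insert q.1 q.2).items = d.items ++ [q] := by
        rw [PySem.Dict.items_insert]
        simp [hq]
      have hnd' : q.1 ∉ L.map Prod.fst ∧ (L.map Prod.fst).Nodup := by
        rw [List.map_cons, List.nodup_cons] at hnd; exact hnd
      have hfresh' : ∀ p ∈ L, (d.insert q.1 q.2).contains p.1 = false := by
        intro p hp
        have hne : p.1 ≠ q.1 := by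
          intro he
          exact hnd'.1 (he ▸ List.mem_map_of_mem hp)
        rw [PySem.Dict.contains_insert]
        simp [hne, hfresh p (by simp [hp])]
      rw [ih _ hnd'.2 hfresh', hstep, List.append_assoc]
      rfl

theorem pvMem_projL_keys (c x : String) (L : List ((String × String) × Int)) :
    x ∈ (pvProjL c L).map (fun p => p.1) ↔ (c, x) ∈ L.map (fun p => p.1) := by
  simp only [pvProjL, List.map_filterMap, List.mem_filterMap, List.mem_map]
  constructor
  · rintro ⟨a, ha, he⟩
    by_cases h1 : a.1.1 = c
    · simp only [if_pos h1, Option.map_some] at he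
      refine ⟨a, ha, ?_⟩
      cases hq : a.1 with | mk u w => simp_all
    · simp [if_neg h1] at he
  · rintro ⟨a, ha, he⟩
    refine ⟨a, ha, ?_⟩
    have h1 : a.1.1 = c := by rw [he]
    have h2 : a.1.2 = x := by rw [he]
    simp [if_pos h1, h2]

theorem pvNodup_projL (c : String) : ∀ L : List ((String × String) × Int),
    (L.map (fun p => p.1)).Nodup → ((pvProjL c L).map (fun p => p.1)).Nodup := by
  intro L
  induction L with
  | nil => intro _; simp [pvProjL]
  | cons q L ih =>
      intro h
      rw [List.map_cons, List.nodup_cons] at h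
      by_cases h1 : q.1.1 = c
      · simp only [pvProjL, List.filterMap_cons, if_pos h1, List.map_cons, List.nodup_cons]
        refine ⟨?_, ih h.2⟩
        intro hmem
        have hmem' : (c, q.1.2) ∈ L.map (fun p => p.1) := (pvMem_projL_keys c q.1.2 L).mp hmem
        apply h.1
        have he : (c, q.1.2) = q.1 := by cases hq : q.1 with | mk u w => simp_all
        rwa [he] at hmem' 
      · simp only [pvProjL, List.filterMap_cons, if_neg h1]
        exact ih h.2

-- the port bodies, pointwise
theorem pvA_body' (m cls : String) (counter : PySem.Dict String Int) (repo : List (String × List (String × String))) :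
    (match (PySem.Dict.mk (((PySem.Dict.mk repo).get? (if m == "model1" then "model1" else "model2")).getD [])).get? cls with
     | some v => if v ≠ "" then counter.modify v 0 (· + 1) else counter
     | none => counter) = pvStepA m cls counter repo := by
  unfold pvStepA pvVal pvLab
  cases h : (PySem.Dict.mk (((PySem.Dict.mk repo).get? (if m == "model1" then "model1" else "model2")).getD []) : PySem.Dict String String).get? cls with
  | none => rfl
  | some v => by_cases hv : v = "" <;> simp [hv]

theorem pvB_body' (m cls : String) (pc : PySem.Dict (String × String) Int) (repo : List (String × List (String × String))) :
    (match (PySem.Dict.mk (((PySem.Dict.mk repo).get? (if m == "model1" then "model1" else "model2")).getD [])).get? cls with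
     | some v => if v ≠ "" then pc.modify (cls, v) 0 (· + 1) else pc
     | none => pc) = pvCond m cls pc repo := by
  unfold pvCond pvVal pvLab
  cases h : (PySem.Dict.mk (((PySem.Dict.mk repo).get? (if m == "model1" then "model1" else "model2")).getD []) : PySem.Dict String String).get? cls with
  | none => rfl
  | some v => by_cases hv : v = "" <;> simp [hv]

theorem pvA_char (repos : List (List (String × List (String × String)))) (m : String) :
    analyze_label_distribution repos m =
      [("actor_unit", (repos.foldl (pvStepA m "actor_unit") PySem.Dict.empty).items),
       ("supply_chain_role", (repos.foldl (pvStepA m "supply_chain_role") PySem.Dict.empty).items),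
       ("research_role", (repos.foldl (pvStepA m "research_role") PySem.Dict.empty).items),
       ("distribution_pathway", (repos.foldl (pvStepA m "distribution_pathway") PySem.Dict.empty).items)] := by
  unfold analyze_label_distribution
  simp only [List.foldl_cons, List.foldl_nil, pvA_body']
  rfl

theorem pvB_char (repos : List (List (String × List (String × String)))) (m : String) :
    analyze_label_distribution_alt repos m =
      [("actor_unit", pvProjL "actor_unit" ((repos.foldl (pvStepP m) PySem.Dict.empty).items)),
       ("supply_chain_role", pvProjL "supply_chain_role" ((repos.foldl (pvStepP m) PySem.Dict.empty).items)),
       ("research_role", pvProjL "research_role" ((repos.foldl (pvStepP m) PySem.Dict.empty).items)),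
       ("distribution_pathway", pvProjL "distribution_pathway" ((repos.foldl (pvStepP m) PySem.Dict.empty).items))] := by
  unfold analyze_label_distribution_alt
  simp only [List.foldl_cons, List.foldl_nil, pvB_body']
  -- the repo sweep is pvStepP
  rw [show (fun (pc : PySem.Dict (String × String) Int) repo =>
        pvCond m "distribution_pathway" (pvCond m "research_role" (pvCond m "supply_chain_role" (pvCond m "actor_unit" pc repo) repo) repo) repo) = pvStepP m from rfl]
  set P := repos.foldl (pvStepP m) PySem.Dict.empty with hP
  have hkeys : ∀ q ∈ P.items, q.1.1 ∈ ["actor_unit", "supply_chain_role", "research_role", "distribution_pathway"] := by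
    intro q hq
    exact pvKeys_foldP m repos PySem.Dict.empty (by intro k hk; simp [PySem.Dict.keys, PySem.Dict.empty] at hk) q.1 (List.mem_map_of_mem hq)
  have hnd : (P.items.map (fun p => p.1)).Nodup :=
    pvNodup_foldP m repos PySem.Dict.empty (by simp [PySem.Dict.keys, PySem.Dict.empty])
  rw [show (PySem.Dict.empty.insert "actor_unit" PySem.Dict.empty |>.insert "supply_chain_role" PySem.Dict.empty |>.insert "research_role" PySem.Dict.empty |>.insert "distribution_pathway" (PySem.Dict.empty : PySem.Dict String Int))
        = PySem.Dict.mk [("actor_unit", PySem.Dict.empty), ("supply_chain_role", PySem.Dict.empty), ("research_role", PySem.Dict.empty), ("distribution_pathway", PySem.Dict.empty)] from rfl]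
  rw [pvStage2 P.items PySem.Dict.empty PySem.Dict.empty PySem.Dict.empty PySem.Dict.empty hkeys]
  have hcomp : ∀ c : String, (P.items.foldl (pvDisp c) PySem.Dict.empty).items = pvProjL c P.items := by
    intro c
    rw [pvDisp_filter]
    rw [pvInsertFold_append (pvProjL c P.items) PySem.Dict.empty (by
          have := pvNodup_projL c P.items hnd
          simpa using this)
        (fun q _ => PySem.Dict.contains_empty q.1)]
    rfl
  simp only [List.map_cons, List.map_nil, hcomp]

theorem pvSpec (repos : List (List (String × List (String × String)))) (m : String) :
    analyze_label_distribution repos m = analyze_label_distribution_alt repos m := by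
  rw [pvA_char, pvB_char]
  have h : ∀ c, c ∈ ["actor_unit", "supply_chain_role", "research_role", "distribution_pathway"] →
      pvProjL c ((repos.foldl (pvStepP m) PySem.Dict.empty).items) = (repos.foldl (pvStepA m c) PySem.Dict.empty).items := by
    intro c hc
    have := congrArg PySem.Dict.items (pvProj_foldP m c hc repos PySem.Dict.empty)
    simpa [pvProj] using this
  rw [h "actor_unit" (by simp), h "supply_chain_role" (by simp), h "research_role" (by simp), h "distribution_pathway" (by simp)]

-- ===== VERDICT (by name: the statement is the Claim_ definition above) =====
theorem analyze_label_distribution_spec : Claim_equal_analyze_label_distribution := by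
  intro repos model_name _ _
  unfold Spec_analyze_label_distribution
  exact pvSpec repos model_name
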